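-- pv_equiv track=rewrite | github.com/DeemaAbuHwaij/PythonKatasFursa | katas/is_valid_git_tree.py | is_valid_git_tree
-- ===== SOURCE A (Python) =====
-- def is_valid_git_tree(tree_map):
--     """
--     Determines if a given tree structure represents a valid Git tree.
--
--     A valid Git tree should:
--     1. Have exactly one root (no parent).
--     2. Contain no cycles.
--
--     Args:
--         tree_map: a dictionary representing the Git tree (commit ID to list of child commit IDs)
--
--     Returns:
--         True if the tree is a valid Git tree, False otherwise
--     """
--     # Step 1: Build a set of all nodes and a set of all children
--     all_nodes = set(tree_map.keys())
--     all_children = set(child for children in tree_map.values() for child in children)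
--
--     # Step 2: The root is a node that is not anyone's child
--     roots = all_nodes - all_children
--     if len(roots) != 1:
--         return False  # Must have exactly one root
--
--     root = roots.pop()
--
--     # Step 3: DFS to detect cycles and ensure all nodes are reachable
--     visited = set()
--     stack = set()
--
--     def dfs(node):
--         if node in stack:
--             return False  # Cycle detected
--         if node in visited:
--             return True   # Already visited safely
--         stack.add(node)
--         for child in tree_map.get(node, []):
--             if not dfs(child):
--                 return False
--         stack.remove(node)
--         visited.add(node)
--         return True
--
--     if not dfs(root):
--         return False
--
--     # Step 4: Ensure all nodes are visited (tree is connected)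
--     return visited == all_nodes
-- ===== SOURCE B (Python) =====
-- def is_valid_git_tree(tree_map):
--     # Same validity check, but the cycle/reachability DFS is an explicit
--     # iterative stack machine (frames of node + remaining children) instead
--     # of a recursive helper with nonlocal sets.
--     all_nodes = set(tree_map.keys())
--     all_children = {child for children in tree_map.values() for child in children}
--
--     roots = all_nodes - all_children
--     if len(roots) != 1:
--         return False
--     root = next(iter(roots))
--
--     visited = set()
--     on_path = {root}
--     frames = [(root, list(tree_map.get(root, [])))]
--     while frames:
--         node, cs = frames[-1]
--         if not cs:
--             frames.pop()
--             on_path.discard(node)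
--             visited.add(node)
--             continue
--         child = cs.pop(0)
--         if child in on_path:
--             return False
--         if child in visited:
--             continue
--         on_path.add(child)
--         frames.append((child, list(tree_map.get(child, []))))
--     return visited == all_nodes
-- ===== Notes on version B (the rewrite author's own statement) =====
-- stated objective: alternative
-- what changed: The recursive dfs helper (with nonlocal visited/on-path sets) is replaced by an explicit iterative stack machine over frames of (node, remaining children), with post-order removal from the on-path set; root detection and the final visited == all_nodes check are unchanged.
import Mathlib
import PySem

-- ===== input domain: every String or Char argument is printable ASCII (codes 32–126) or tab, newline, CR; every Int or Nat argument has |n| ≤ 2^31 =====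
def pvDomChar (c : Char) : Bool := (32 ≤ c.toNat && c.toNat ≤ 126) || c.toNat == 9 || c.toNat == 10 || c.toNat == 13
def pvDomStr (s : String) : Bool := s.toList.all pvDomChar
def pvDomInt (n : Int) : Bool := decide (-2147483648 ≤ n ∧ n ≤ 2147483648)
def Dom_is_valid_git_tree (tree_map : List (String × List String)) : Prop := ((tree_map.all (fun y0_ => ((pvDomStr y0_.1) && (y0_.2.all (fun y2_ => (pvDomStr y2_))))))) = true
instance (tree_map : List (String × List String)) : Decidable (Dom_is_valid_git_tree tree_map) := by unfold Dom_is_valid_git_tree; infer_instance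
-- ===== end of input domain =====

-- B replaces A's recursive dfs (nonlocal visited/stack sets) by an explicit iterative
-- stack machine over frames (node, remaining children); same root check, same sets,
-- same final visited == all_nodes comparison. Objective: alternative decomposition.
-- Both Lean ports carry a per-call fuel (a pure termination device, mirrored exactly
-- between the two ports; with the initial fuel tree_map.length + 2 it never runs out
-- on actual runs, since the on-path set bounds the recursion depth by the key count).

-- ===== PORT A =====
-- dfsA fuel node visited stack: Python's `dfs(node)` with the two nonlocal sets threaded
-- through; returns (result, visited, stack); `none` = fuel exhausted (never in practice).
-- dfsListA: the `for child in tree_map.get(node, [])` loop with its early False return.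
mutual
def dfsA (tm : PySem.Dict String (List String)) :
    Nat → String → PySem.Set String → PySem.Set String →
    Option (Bool × PySem.Set String × PySem.Set String)
  | 0, _, _, _ => none
  | f + 1, node, visited, stk =>
    if PySem.Set.contains stk node then some (false, visited, stk)
    else if PySem.Set.contains visited node then some (true, visited, stk)
    else
      match dfsListA tm f (tm.getD node []) visited (PySem.Set.add stk node) with
      | none => none
      | some (false, v', s') => some (false, v', s')
      -- stack.remove(node): node is still present on the success path, so = discard
      | some (true, v', s') => some (true, PySem.Set.add v' node, PySem.Set.discard s' node)
termination_by f _ _ _ => (f, 0)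

def dfsListA (tm : PySem.Dict String (List String)) :
    Nat → List String → PySem.Set String → PySem.Set String →
    Option (Bool × PySem.Set String × PySem.Set String)
  | _, [], visited, stk => some (true, visited, stk)
  | f, c :: cs, visited, stk =>
    match dfsA tm f c visited stk with
    | none => none
    | some (false, v', s') => some (false, v', s')
    | some (true, v', s') => dfsListA tm f cs v' s'
termination_by f cs _ _ => (f, cs.length + 1)
end

def is_valid_git_tree (tree_map : List (String × List String)) : Bool :=
  let tm := PySem.Dict.ofList tree_map
  let all_nodes : PySem.Set String := PySem.Set.ofList tm.keys
  let all_children : PySem.Set String := PySem.Set.ofList (tm.values.flatMap (fun cs => cs))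
  match PySem.Set.diff all_nodes all_children with   -- len(roots) != 1 → False; roots.pop()
  | [root] =>
    match dfsA tm (tree_map.length + 2) root PySem.Set.empty PySem.Set.empty with
    | some (true, visited, _) => PySem.Set.equal visited all_nodes
    | _ => false
  | _ => false

-- ===== PORT B =====
-- Width bound and its defining property, used only by the termination measure of the machine.
def maxChildLen (tm : PySem.Dict String (List String)) : Nat :=
  (tm.values.map List.length).foldl max 0

theorem getD_length_le_maxChildLen (tm : PySem.Dict String (List String)) (c : String) :
    (tm.getD c []).length ≤ maxChildLen tm := by
  rw [PySem.Dict.getD_eq_get?_getD]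
  cases h : tm.get? c with
  | none => simp [maxChildLen]
  | some l =>
    have hmem : (c, l) ∈ tm.items := PySem.Dict.mem_items_of_get?_eq_some tm h
    have hv : l.length ∈ tm.values.map List.length := by
      simp only [PySem.Dict.values, List.map_map, List.mem_map]
      exact ⟨(c, l), hmem, rfl⟩
    simpa [maxChildLen] using (PySem.List.le_foldl_max (tm.values.map List.length) 0).2 _ hv

-- runB: B's while-loop. A frame (f, node, cs) is node with its remaining children cs;
-- f is the fuel the corresponding dfs call would hold (termination device, as in port A).
def runB (tm : PySem.Dict String (List String)) :
    List (Nat × String × List String) → PySem.Set String → PySem.Set String →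
    Option (Bool × PySem.Set String)
  | [], visited, _ => some (true, visited)
  | (_f, n, []) :: rest, visited, onpath =>
    runB tm rest (PySem.Set.add visited n) (PySem.Set.discard onpath n)
  | (0, _, _ :: _) :: _, _, _ => none
  | (f + 1, n, c :: cs) :: rest, visited, onpath =>
    if PySem.Set.contains onpath c then some (false, visited)
    else if PySem.Set.contains visited c then runB tm ((f + 1, n, cs) :: rest) visited onpath
    else runB tm ((f, c, tm.getD c []) :: (f + 1, n, cs) :: rest) visited (PySem.Set.add onpath c)
termination_by frames _ _ =>
  (frames.map (fun fr => (fr.2.2.length + 1) * (maxChildLen tm + 2) ^ fr.1)).sum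
decreasing_by
  · -- pop: the head frame's weight (≥ 1) disappears
    simp only [List.map_cons, List.sum_cons, List.length_nil]
    have hp : 0 < (maxChildLen tm + 2) ^ _f := Nat.pow_pos (by omega)
    omega
  · -- skip an already-visited child: the head frame loses one child
    simp only [List.map_cons, List.sum_cons, List.length_cons, Nat.succ_eq_add_one]
    have hp : 0 < (maxChildLen tm + 2) ^ (f + 1) := Nat.pow_pos (by omega)
    have hsplit : (cs.length + 1 + 1) * (maxChildLen tm + 2) ^ (f + 1)
        = (cs.length + 1) * (maxChildLen tm + 2) ^ (f + 1) + (maxChildLen tm + 2) ^ (f + 1) := by ring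
    omega
  · -- push: the new frame's weight is below one unit of the parent's weight
    simp only [List.map_cons, List.sum_cons, List.length_cons, Nat.succ_eq_add_one]
    have hle : (tm.getD c []).length ≤ maxChildLen tm := getD_length_le_maxChildLen tm c
    have hlt : ((tm.getD c []).length + 1) * (maxChildLen tm + 2) ^ f
        < (maxChildLen tm + 2) ^ (f + 1) := by
      calc ((tm.getD c []).length + 1) * (maxChildLen tm + 2) ^ f
          < (maxChildLen tm + 2) * (maxChildLen tm + 2) ^ f :=
            Nat.mul_lt_mul_of_lt_of_le (by omega) (le_refl _) (Nat.pow_pos (by omega))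
        _ = (maxChildLen tm + 2) ^ (f + 1) := by ring
    have hsplit : (cs.length + 1 + 1) * (maxChildLen tm + 2) ^ (f + 1)
        = (cs.length + 1) * (maxChildLen tm + 2) ^ (f + 1) + (maxChildLen tm + 2) ^ (f + 1) := by ring
    omega

def is_valid_git_tree_alt (tree_map : List (String × List String)) : Bool :=
  let tm := PySem.Dict.ofList tree_map
  let all_nodes : PySem.Set String := PySem.Set.ofList tm.keys
  let all_children : PySem.Set String := PySem.Set.ofList (tm.values.flatMap (fun cs => cs))
  let roots := PySem.Set.diff all_nodes all_children
  if PySem.Set.len roots != 1 then false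
  else
    match roots with
    | [] => false
    | root :: _ =>                               -- root = next(iter(roots)), the unique element
      match runB tm [(tree_map.length + 1, root, tm.getD root [])]
          PySem.Set.empty (PySem.Set.add PySem.Set.empty root) with
      | some (b, visited) => b && PySem.Set.equal visited all_nodes
      | none => false

-- ===== PRECONDITION & SPEC =====
def Spec_is_valid_git_tree (tree_map : List (String × List String)) (out : Bool) : Prop := out = is_valid_git_tree_alt tree_map
instance (tree_map : List (String × List String)) (out : Bool) : Decidable (Spec_is_valid_git_tree tree_map out) := by unfold Spec_is_valid_git_tree; infer_instance

-- ===== CLAIM (what is proved, stated in full; the proofs are below) =====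
def Claim_equal_is_valid_git_tree : Prop := ∀ (tree_map : List (String × List String)), Dom_is_valid_git_tree tree_map → Spec_is_valid_git_tree tree_map (is_valid_git_tree tree_map)

-- ===== LEMMAS AND PROOFS =====

-- The termination measure of runB, named for the induction.
def pvMu (tm : PySem.Dict String (List String)) (frames : List (Nat × String × List String)) : Nat :=
  (frames.map (fun fr => (fr.2.2.length + 1) * (maxChildLen tm + 2) ^ fr.1)).sum

-- The machine processing a frame (f, n, cs) computes exactly the child loop dfsListA f cs,
-- then performs dfs's post-order bookkeeping for n and continues with the remaining frames.
-- Strong induction on the machine's own measure pvMu of the frame stack.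
theorem runB_eq_dfsListA_aux (tm : PySem.Dict String (List String)) (N : Nat) :
    ∀ (f : Nat) (n : String) (cs : List String)
      (rest : List (Nat × String × List String)) (v s : PySem.Set String),
    pvMu tm ((f, n, cs) :: rest) < N →
    runB tm ((f, n, cs) :: rest) v s =
      match dfsListA tm f cs v s with
      | none => none
      | some (false, v', _) => some (false, v')
      | some (true, v', s') =>
        runB tm rest (PySem.Set.add v' n) (PySem.Set.discard s' n) := by
  induction N with
  | zero => intro f n cs rest v s h; omega
  | succ N ih =>
    intro f n cs rest v s hμ
    match f, cs with
    | f, [] =>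
      rw [runB]
      conv_rhs => rw [dfsListA]
    | 0, c :: cs =>
      rw [runB]
      conv_rhs => rw [dfsListA, dfsA]
    | f + 1, c :: cs =>
      have hW : 0 < (maxChildLen tm + 2) ^ (f + 1) := Nat.pow_pos (by omega)
      have hsplit : (cs.length + 1 + 1) * (maxChildLen tm + 2) ^ (f + 1)
          = (cs.length + 1) * (maxChildLen tm + 2) ^ (f + 1) + (maxChildLen tm + 2) ^ (f + 1) := by
        ring
      have hμ' : pvMu tm ((f + 1, n, cs) :: rest) < N := by
        simp only [pvMu, List.map_cons, List.sum_cons, List.length_cons] at hμ ⊢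
        omega
      rw [runB]
      conv_rhs => rw [dfsListA, dfsA]
      by_cases hs : c ∈ s
      · simp [PySem.Set.contains, List.contains_eq_mem, hs]
      · by_cases hv : c ∈ v
        · simp only [PySem.Set.contains, List.contains_eq_mem, hs, hv, decide_true, decide_false,
            Bool.false_eq_true, if_true, if_false]
          exact ih (f + 1) n cs rest v s hμ'
        · have hle : (tm.getD c []).length ≤ maxChildLen tm := getD_length_le_maxChildLen tm c
          have hlt : ((tm.getD c []).length + 1) * (maxChildLen tm + 2) ^ f
              < (maxChildLen tm + 2) ^ (f + 1) := by
            calc ((tm.getD c []).length + 1) * (maxChildLen tm + 2) ^ f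
                < (maxChildLen tm + 2) * (maxChildLen tm + 2) ^ f :=
                  Nat.mul_lt_mul_of_lt_of_le (by omega) (le_refl _) (Nat.pow_pos (by omega))
              _ = (maxChildLen tm + 2) ^ (f + 1) := by ring
          have hμp : pvMu tm ((f, c, tm.getD c []) :: (f + 1, n, cs) :: rest) < N := by
            simp only [pvMu, List.map_cons, List.sum_cons, List.length_cons] at hμ ⊢
            omega
          simp only [PySem.Set.contains, List.contains_eq_mem, hs, hv, decide_false,
            Bool.false_eq_true, if_false]
          rw [ih f c (tm.getD c []) ((f + 1, n, cs) :: rest) v (PySem.Set.add s c) hμp]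
          cases hr : dfsListA tm f (tm.getD c []) v (PySem.Set.add s c) with
          | none => rfl
          | some r =>
            obtain ⟨b, v', s'⟩ := r
            cases b with
            | false => rfl
            | true => exact ih (f + 1) n cs rest (PySem.Set.add v' c) (PySem.Set.discard s' c) hμ'

theorem runB_eq_dfsListA (tm : PySem.Dict String (List String))
    (f : Nat) (n : String) (cs : List String)
    (rest : List (Nat × String × List String)) (v s : PySem.Set String) :
    runB tm ((f, n, cs) :: rest) v s =
      match dfsListA tm f cs v s with
      | none => none
      | some (false, v', _) => some (false, v')
      | some (true, v', s') =>
        runB tm rest (PySem.Set.add v' n) (PySem.Set.discard s' n) :=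
  runB_eq_dfsListA_aux tm (pvMu tm ((f, n, cs) :: rest) + 1) f n cs rest v s (Nat.lt_succ_self _)

-- ===== VERDICT (by name: the statement is the Claim_ definition above) =====
theorem is_valid_git_tree_spec : Claim_equal_is_valid_git_tree := by
  unfold Claim_equal_is_valid_git_tree Spec_is_valid_git_tree
  intro tree_map _
  simp only [is_valid_git_tree, is_valid_git_tree_alt]
  cases hroots : PySem.Set.diff (PySem.Set.ofList (PySem.Dict.ofList tree_map).keys)
      (PySem.Set.ofList ((PySem.Dict.ofList tree_map).values.flatMap (fun cs => cs))) with
  | nil => rfl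
  | cons root tl =>
    cases tl with
    | cons _ _ =>
      simp only [PySem.Set.len, List.length_cons]
      rw [if_pos (by simp only [bne_iff_ne, ne_eq]; omega)]
    | nil =>
      simp only [PySem.Set.len, List.length_cons, List.length_nil]
      rw [runB_eq_dfsListA]
      rw [show tree_map.length + 2 = (tree_map.length + 1) + 1 from rfl, dfsA]
      have hc : PySem.Set.contains PySem.Set.empty root = false := by
        simp [PySem.Set.contains, PySem.Set.empty]
      simp only [hc, Bool.false_eq_true, if_false]
      cases hr : dfsListA (PySem.Dict.ofList tree_map) (tree_map.length + 1)
          ((PySem.Dict.ofList tree_map).getD root [])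
          PySem.Set.empty (PySem.Set.add PySem.Set.empty root) with
      | none => rfl
      | some r =>
        obtain ⟨b, v', s'⟩ := r
        cases b with
        | false => rfl
        | true => simp [runB]
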